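-- pv_equiv track=rewrite | github.com/shakfu/aldapy | src/aldakit/midi/generator.py | _parse_explicit_accidentals
-- ===== SOURCE A (Python) =====
-- def _parse_explicit_accidentals(symbols: list[str]) -> dict[str, str]:
--     """Parse explicit accidentals like: e flat b flat."""
--     key_sig: dict[str, str] = {}
--     i = 0
--     while i < len(symbols):
--         if symbols[i] in "abcdefg" and i + 1 < len(symbols):
--             note = symbols[i]
--             acc = symbols[i + 1]
--             if acc == "flat":
--                 key_sig[note] = "-"
--                 i += 2
--             elif acc == "sharp":
--                 key_sig[note] = "+"
--                 i += 2
--             else: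
--                 i += 1
--         else:
--             i += 1
--     return key_sig
-- ===== SOURCE B (Python) =====
-- def _parse_explicit_accidentals(symbols: list[str]) -> dict[str, str]:
--     """Parse explicit accidentals like: e flat b flat."""
--     marks = {"flat": "-", "sharp": "+"}
--     key_sig: dict[str, str] = {}
--     for note, acc in zip(symbols, symbols[1:]):
--         if note in "abcdefg" and acc in marks:
--             key_sig[note] = marks[acc]
--     return key_sig
-- ===== Notes on version B (the rewrite author's own statement) =====
-- stated objective: simpler
-- what changed: Replaced the manual-index while-loop state machine (with its conditional i+=2/i+=1 stepping) by a stateless left-to-right fold over adjacent pairs zip(symbols, symbols[1:]) with a marks lookup table; the skipped accidental positions are provably no-ops since 'flat'/'sharp' are never substrings of 'abcdefg'. (constant-factor speedup: one unconditional pass with a dict lookup instead of per-step index comparisons and branching).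
import Mathlib
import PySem

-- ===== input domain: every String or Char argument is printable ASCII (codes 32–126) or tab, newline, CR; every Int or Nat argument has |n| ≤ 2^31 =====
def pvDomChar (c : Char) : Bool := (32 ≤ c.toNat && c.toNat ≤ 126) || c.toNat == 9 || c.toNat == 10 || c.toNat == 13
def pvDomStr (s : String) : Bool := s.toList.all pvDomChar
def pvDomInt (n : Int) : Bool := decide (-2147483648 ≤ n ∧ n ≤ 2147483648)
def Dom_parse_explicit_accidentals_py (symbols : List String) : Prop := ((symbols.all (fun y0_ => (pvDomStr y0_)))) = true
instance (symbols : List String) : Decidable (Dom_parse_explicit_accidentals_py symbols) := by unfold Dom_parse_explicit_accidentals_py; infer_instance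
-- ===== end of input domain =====

-- B replaces A's manual-index while-loop state machine by a single stateless fold over
-- adjacent pairs (zip of the list with its tail), looking the accidental up in a marks dict;
-- objective: simpler (no i-bookkeeping). Equivalence holds on all inputs.

-- ===== PORT A =====
-- while-loop of A: recursion on the index i, dict accumulator key_sig
def parse_explicit_accidentals_loop (symbols : List String)
    (key_sig : PySem.Dict String String) (i : Nat) : PySem.Dict String String :=
  if h : i < symbols.length then
    -- symbols[i] in "abcdefg" (Python substring test) and i + 1 < len(symbols)
    if PySem.Str.isIn (symbols.getD i "") "abcdefg" && decide (i + 1 < symbols.length) then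
      let note := symbols.getD i ""
      let acc := symbols.getD (i + 1) ""
      if acc == "flat" then
        parse_explicit_accidentals_loop symbols (key_sig.insert note "-") (i + 2)
      else if acc == "sharp" then
        parse_explicit_accidentals_loop symbols (key_sig.insert note "+") (i + 2)
      else
        parse_explicit_accidentals_loop symbols key_sig (i + 1)
    else
      parse_explicit_accidentals_loop symbols key_sig (i + 1)
  else
    key_sig
termination_by symbols.length - i
decreasing_by all_goals omega

def parse_explicit_accidentals_py (symbols : List String) : List (String × String) :=
  (parse_explicit_accidentals_loop symbols PySem.Dict.empty 0).items

-- ===== PORT B =====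
-- marks = {"flat": "-", "sharp": "+"}
def pvMarks : PySem.Dict String String :=
  (PySem.Dict.empty.insert "flat" "-").insert "sharp" "+"

-- for note, acc in zip(symbols, symbols[1:]): if note in "abcdefg" and acc in marks: key_sig[note] = marks[acc]
def parse_explicit_accidentals_py_alt (symbols : List String) : List (String × String) :=
  ((symbols.zip (PySem.List.slice symbols (some 1) none)).foldl
    (fun key_sig p =>
      if PySem.Str.isIn p.1 "abcdefg" && pvMarks.contains p.2 then
        key_sig.insert p.1 (pvMarks.getD p.2 "")
      else key_sig)
    PySem.Dict.empty).items

-- ===== PRECONDITION & SPEC =====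
def Spec_parse_explicit_accidentals_py (symbols : List String) (out : List (String × String)) : Prop := out = parse_explicit_accidentals_py_alt symbols
instance (symbols : List String) (out : List (String × String)) : Decidable (Spec_parse_explicit_accidentals_py symbols out) := by unfold Spec_parse_explicit_accidentals_py; infer_instance

-- ===== CLAIM (what is proved, stated in full; the proofs are below) =====
def Claim_equal_parse_explicit_accidentals_py : Prop := ∀ (symbols : List String), Dom_parse_explicit_accidentals_py symbols → Spec_parse_explicit_accidentals_py symbols (parse_explicit_accidentals_py symbols)

-- ===== LEMMAS AND PROOFS =====

-- B's fold over adjacent pairs, as a function of the remaining suffix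
def pvPairs (l : List String) (d : PySem.Dict String String) : PySem.Dict String String :=
  (l.zip (l.drop 1)).foldl
    (fun key_sig p =>
      if PySem.Str.isIn p.1 "abcdefg" && pvMarks.contains p.2 then
        key_sig.insert p.1 (pvMarks.getD p.2 "")
      else key_sig)
    d

lemma pvPairs_nil (d : PySem.Dict String String) : pvPairs [] d = d := rfl

lemma pvPairs_single (x : String) (d : PySem.Dict String String) : pvPairs [x] d = d := rfl

lemma pvPairs_cons_cons (x y : String) (t : List String) (d : PySem.Dict String String) :
    pvPairs (x :: y :: t) d =
      pvPairs (y :: t)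
        (if PySem.Str.isIn x "abcdefg" && pvMarks.contains y then
          d.insert x (pvMarks.getD y "") else d) := by
  simp [pvPairs]

lemma pvPairs_skip (y : String) (t : List String) (d : PySem.Dict String String)
    (h : PySem.Str.isIn y "abcdefg" = false) : pvPairs (y :: t) d = pvPairs t d := by
  cases t with
  | nil => rfl
  | cons a t' => rw [pvPairs_cons_cons, h]; simp

lemma pvMarks_contains (y : String) :
    pvMarks.contains y = (y == "flat" || y == "sharp") := by
  simp [pvMarks, PySem.Dict.contains, PySem.Dict.insert, PySem.Dict.empty]
  cases h1 : y == "flat" <;> cases h2 : y == "sharp" <;> simp_all [BEq.comm]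

lemma pvLoop_eq_pvPairs (symbols : List String) (n : Nat) :
    ∀ i d, symbols.length - i ≤ n →
      parse_explicit_accidentals_loop symbols d i = pvPairs (symbols.drop i) d := by
  induction n with
  | zero =>
    intro i d hn
    have hge : symbols.length ≤ i := by omega
    rw [parse_explicit_accidentals_loop, dif_neg (by omega), List.drop_eq_nil_of_le hge,
      pvPairs_nil]
  | succ n ih =>
    intro i d hn
    by_cases h : i < symbols.length
    · rw [parse_explicit_accidentals_loop, dif_pos h, List.drop_eq_getElem_cons h]
      have hx : symbols.getD i "" = symbols[i] := List.getD_eq_getElem _ _ h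
      by_cases h2 : i + 1 < symbols.length
      · rw [List.drop_eq_getElem_cons h2]
        have hy : symbols.getD (i + 1) "" = symbols[i + 1] := List.getD_eq_getElem _ _ h2
        by_cases hin : PySem.Str.isIn symbols[i] "abcdefg" = true
        · rw [if_pos (by rw [hx, hin]; simp [h2])]
          simp only [hx, hy]
          by_cases hf : symbols[i + 1] = "flat"
          · rw [if_pos (by simp [hf]), ih _ _ (by omega), pvPairs_cons_cons, hf,
              pvPairs_skip _ _ _ (by decide),
              if_pos (show _ = true by rw [hin]; rfl)]
            rfl
          · by_cases hs : symbols[i + 1] = "sharp"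
            · rw [if_neg (by simp [hs]), if_pos (by simp [hs]), ih _ _ (by omega),
                pvPairs_cons_cons, hs, pvPairs_skip _ _ _ (by decide),
                if_pos (show _ = true by rw [hin]; rfl)]
              rfl
            · rw [if_neg (by simp [hf]), if_neg (by simp [hs]), ih _ _ (by omega),
                List.drop_eq_getElem_cons h2, pvPairs_cons_cons,
                if_neg (by rw [pvMarks_contains]; simp [hf, hs])]
        · rw [if_neg (by rw [hx]; simp only [Bool.and_eq_true]; rintro ⟨hc, -⟩; exact hin hc),
            ih _ _ (by omega), List.drop_eq_getElem_cons h2, pvPairs_cons_cons,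
            if_neg (by simp only [Bool.and_eq_true]; rintro ⟨hc, -⟩; exact hin hc)]
      · rw [if_neg (by simp only [Bool.and_eq_true, decide_eq_true_eq]; rintro ⟨-, hc⟩; omega),
          ih _ _ (by omega), List.drop_eq_nil_of_le (by omega), pvPairs_single, pvPairs_nil]
    · rw [parse_explicit_accidentals_loop, dif_neg h,
        List.drop_eq_nil_of_le (by omega), pvPairs_nil]

-- ===== VERDICT (by name: the statement is the Claim_ definition above) =====
theorem parse_explicit_accidentals_py_spec : Claim_equal_parse_explicit_accidentals_py := by
  intro symbols _
  unfold Spec_parse_explicit_accidentals_py parse_explicit_accidentals_py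
    parse_explicit_accidentals_py_alt
  rw [pvLoop_eq_pvPairs symbols symbols.length 0 _ (by omega)]
  rw [PySem.List.slice_from symbols (by norm_num)]
  rfl
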